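-- pv_equiv track=rewrite | github.com/guguguc/yolov3 | utils/parser.py | split_labels
-- ===== SOURCE A (Python) =====
-- def split_labels(img_labels_str_list: list):
--     """ 将每行表示图像box参数的字符串列表划分为分割的数值列表 """
--     all_labels = []
--     for img_labels_str in img_labels_str_list:
--         data_points = list(map(int, img_labels_str.split()))
--         label = []
--         for idx in range(0, len(data_points), 5):
--             label.append(data_points[idx:idx + 5])
--         all_labels.append(label)
--     return all_labels
-- ===== SOURCE B (Python) =====
-- def split_labels(img_labels_str_list: list):
--     """ Single fused pass per line: parse tokens and group them with a running
--     buffer (appended when it reaches 5, trailing partial kept), instead of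
--     materialising the whole int list and slicing it by stride-5 indices. """
--     all_labels = []
--     for img_labels_str in img_labels_str_list:
--         label = []
--         current = []
--         for tok in img_labels_str.split():
--             current.append(int(tok))
--             if len(current) == 5:
--                 label.append(current)
--                 current = []
--         if current:
--             label.append(current)
--         all_labels.append(label)
--     return all_labels
-- ===== Notes on version B (the rewrite author's own statement) =====
-- stated objective: alternative
-- what changed: B makes a single fused pass per line: it parses each token and groups ints with a running buffer flushed at size 5 (trailing partial kept), instead of building the full int list and slicing it at stride-5 range indices.
import Mathlib
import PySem

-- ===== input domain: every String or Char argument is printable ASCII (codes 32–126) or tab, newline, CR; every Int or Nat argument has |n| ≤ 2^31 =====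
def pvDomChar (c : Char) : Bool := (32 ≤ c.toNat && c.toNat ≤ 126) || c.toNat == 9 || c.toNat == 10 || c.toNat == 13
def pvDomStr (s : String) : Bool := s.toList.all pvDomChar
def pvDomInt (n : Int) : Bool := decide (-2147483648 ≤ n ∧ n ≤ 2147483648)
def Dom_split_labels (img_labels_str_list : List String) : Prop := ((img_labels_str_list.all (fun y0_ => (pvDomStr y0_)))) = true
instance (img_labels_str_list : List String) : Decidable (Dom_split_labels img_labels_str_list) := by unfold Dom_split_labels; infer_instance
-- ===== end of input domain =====

-- B fuses parsing and grouping into one pass per line with a running 5-buffer instead of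
-- materialising the int list and slicing it at stride-5 indices (objective: alternative).

-- ===== PORT A =====
def split_labels (img_labels_str_list : List String) : List (List (List Int)) :=
  img_labels_str_list.foldl (fun all_labels img_labels_str =>
    let data_points : List Int :=
      (PySem.Str.split₀ img_labels_str).map (fun t => (PySem.Int.ofStr? t).getD 0)
    let label : List (List Int) :=
      (PySem.List.pyRange 0 (PySem.List.len data_points) 5).foldl
        (fun label idx =>
          label ++ [PySem.List.slice data_points (some idx) (some (idx + 5))]) []
    all_labels ++ [label]) []

-- ===== PORT B =====
def split_labels_alt (img_labels_str_list : List String) : List (List (List Int)) :=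
  img_labels_str_list.foldl (fun all_labels img_labels_str =>
    let p : List (List Int) × List Int :=
      (PySem.Str.split₀ img_labels_str).foldl
        (fun (st : List (List Int) × List Int) tok =>
          let current := st.2 ++ [(PySem.Int.ofStr? tok).getD 0]
          if current.length == 5 then (st.1 ++ [current], ([] : List Int))
          else (st.1, current))
        ([], [])
    all_labels ++ [if p.2.isEmpty then p.1 else p.1 ++ [p.2]]) []

-- ===== PRECONDITION & SPEC =====
-- Pre_: every whitespace-separated token of every line parses as a Python int
-- (on any other input A raises ValueError and returns nothing).
def Pre_split_labels (img_labels_str_list : List String) : Prop :=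
  (img_labels_str_list.all (fun s =>
    (PySem.Str.split₀ s).all (fun t => (PySem.Int.ofStr? t).isSome))) = true
instance (img_labels_str_list : List String) : Decidable (Pre_split_labels img_labels_str_list) := by
  unfold Pre_split_labels; infer_instance

def pvWitness_split_labels : List String := ["1 2 3 4 5 6 7", "", " -3  +4 "]

def Spec_split_labels (img_labels_str_list : List String) (out : List (List (List Int))) : Prop :=
  out = split_labels_alt img_labels_str_list
instance (img_labels_str_list : List String) (out : List (List (List Int))) : Decidable (Spec_split_labels img_labels_str_list out) := by
  unfold Spec_split_labels; infer_instance

-- ===== CLAIM (what is proved, stated in full; the proofs are below) =====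
def Claim_equal_split_labels : Prop := ∀ (img_labels_str_list : List String), Dom_split_labels img_labels_str_list → Pre_split_labels img_labels_str_list → Spec_split_labels img_labels_str_list (split_labels img_labels_str_list)

-- ===== LEMMAS AND PROOFS =====

-- reference chunking: successive groups of 5, trailing partial group kept
def chunks (l : List Int) : List (List Int) :=
  if h : l = [] then [] else l.take 5 :: chunks (l.drop 5)
termination_by l.length
decreasing_by
  have hl : 0 < l.length := List.length_pos_of_ne_nil h
  simp [List.length_drop]; omega

theorem chunks_nil : chunks [] = [] := by rw [chunks]; simp

theorem chunks_ne_nil (l : List Int) (h : l ≠ []) :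
    chunks l = l.take 5 :: chunks (l.drop 5) := by
  rw [chunks]; simp [h]

-- A's stride-5 slicing, written as a map over List.range, equals chunks
theorem rangeMap_eq_chunks (m : Nat) (xs : List Int) (h : m = (xs.length + 4) / 5) :
    (List.range m).map (fun k => (xs.drop (5 * k)).take 5) = chunks xs := by
  induction m generalizing xs with
  | zero =>
      have hx : xs.length = 0 := by omega
      have hnil : xs = [] := List.eq_nil_of_length_eq_zero hx
      simp [hnil, chunks_nil]
  | succ m ih =>
      have hlen : 0 < xs.length := by omega
      have hne : xs ≠ [] := List.ne_nil_of_length_pos hlen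
      rw [List.range_succ_eq_map, List.map_cons, List.map_map]
      have htail : ((fun k => (xs.drop (5 * k)).take 5) ∘ Nat.succ) =
          (fun k => ((xs.drop 5).drop (5 * k)).take 5) := by
        funext k
        simp only [Function.comp]
        rw [List.drop_drop, show 5 * Nat.succ k = 5 + 5 * k from by omega]
      have hm : m = ((xs.drop 5).length + 4) / 5 := by
        rw [List.length_drop]; omega
      rw [htail, ih (xs.drop 5) hm]
      rw [chunks_ne_nil xs hne]
      simp

-- B's loop step, with the token already parsed
def stepB (st : List (List Int) × List Int) (v : Int) : List (List Int) × List Int :=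
  if (st.2 ++ [v]).length = 5 then (st.1 ++ [st.2 ++ [v]], []) else (st.1, st.2 ++ [v])

-- B's running-buffer fold (plus the final flush) equals chunks
theorem foldB_eq_chunks (xs : List Int) : ∀ (acc : List (List Int)) (cur : List Int),
    cur.length < 5 →
    (if (List.foldl stepB (acc, cur) xs).2.isEmpty
      then (List.foldl stepB (acc, cur) xs).1
      else (List.foldl stepB (acc, cur) xs).1 ++ [(List.foldl stepB (acc, cur) xs).2])
    = acc ++ chunks (cur ++ xs) := by
  induction xs with
  | nil =>
      intro acc cur h
      simp only [List.foldl_nil, List.append_nil]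
      by_cases hc : cur = []
      · simp [hc, chunks_nil]
      · have hcur : chunks cur = [cur] := by
          rw [chunks_ne_nil cur hc]
          rw [List.take_of_length_le (by omega), List.drop_of_length_le (by omega)]
          simp [chunks_nil]
        simp [List.isEmpty_iff, hc, hcur]
  | cons x xs ih =>
      intro acc cur h
      simp only [List.foldl_cons]
      by_cases h5 : (cur ++ [x]).length = 5
      · have hs : stepB (acc, cur) x = (acc ++ [cur ++ [x]], []) := by
          simp [stepB, h5]
        rw [hs, ih (acc ++ [cur ++ [x]]) [] (by simp)]
        have hchunk : chunks (cur ++ x :: xs) = (cur ++ [x]) :: chunks xs := by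
          have hsplit : cur ++ x :: xs = (cur ++ [x]) ++ xs := by simp
          rw [hsplit, chunks_ne_nil _ (by simp), List.take_left' h5, List.drop_left' h5]
        rw [hchunk]
        simp
      · have h4 : ¬ cur.length = 4 := by simp at h5; omega
        have hs : stepB (acc, cur) x = (acc, cur ++ [x]) := by
          simp [stepB, h4]
        have hlt : (cur ++ [x]).length < 5 := by
          have hx1 : (cur ++ [x]).length = cur.length + 1 := by simp
          omega
        rw [hs, ih acc (cur ++ [x]) hlt]
        have hassoc : (cur ++ [x]) ++ xs = cur ++ x :: xs := by simp
        rw [hassoc]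

-- per-line equality: A's slicing loop = B's buffer loop, on one line's tokens
theorem line_eq (s : String) :
    (List.foldl
      (fun label idx =>
        label ++ [PySem.List.slice
          ((PySem.Str.split₀ s).map (fun t => (PySem.Int.ofStr? t).getD 0))
          (some idx) (some (idx + 5))]) []
      (PySem.List.pyRange 0
        (PySem.List.len ((PySem.Str.split₀ s).map (fun t => (PySem.Int.ofStr? t).getD 0))) 5)) =
    (if (List.foldl
          (fun (st : List (List Int) × List Int) tok =>
            let current := st.2 ++ [(PySem.Int.ofStr? tok).getD 0]
            if current.length == 5 then (st.1 ++ [current], ([] : List Int))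
            else (st.1, current)) ([], []) (PySem.Str.split₀ s)).2.isEmpty
      then (List.foldl
          (fun (st : List (List Int) × List Int) tok =>
            let current := st.2 ++ [(PySem.Int.ofStr? tok).getD 0]
            if current.length == 5 then (st.1 ++ [current], ([] : List Int))
            else (st.1, current)) ([], []) (PySem.Str.split₀ s)).1
      else (List.foldl
          (fun (st : List (List Int) × List Int) tok =>
            let current := st.2 ++ [(PySem.Int.ofStr? tok).getD 0]
            if current.length == 5 then (st.1 ++ [current], ([] : List Int))
            else (st.1, current)) ([], []) (PySem.Str.split₀ s)).1 ++
        [(List.foldl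
          (fun (st : List (List Int) × List Int) tok =>
            let current := st.2 ++ [(PySem.Int.ofStr? tok).getD 0]
            if current.length == 5 then (st.1 ++ [current], ([] : List Int))
            else (st.1, current)) ([], []) (PySem.Str.split₀ s)).2]) := by
  have hb : (fun (st : List (List Int) × List Int) (tok : String) =>
      let current := st.2 ++ [(PySem.Int.ofStr? tok).getD 0]
      if current.length == 5 then (st.1 ++ [current], ([] : List Int))
      else (st.1, current)) =
      fun st tok => stepB st ((PySem.Int.ofStr? tok).getD 0) := by
    funext st tok
    by_cases hl : (st.2 ++ [(PySem.Int.ofStr? tok).getD 0]).length = 5 <;>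
      simp [stepB, hl]
  rw [hb]
  rw [← List.foldl_map (f := fun t => (PySem.Int.ofStr? t).getD 0) (g := stepB)]
  rw [foldB_eq_chunks ((PySem.Str.split₀ s).map (fun t => (PySem.Int.ofStr? t).getD 0)) [] []
      (by simp)]
  rw [List.nil_append, List.nil_append]
  set xs : List Int := (PySem.Str.split₀ s).map (fun t => (PySem.Int.ofStr? t).getD 0) with hxs
  rw [PySem.List.foldl_append_singleton_eq_map
      (fun idx => PySem.List.slice xs (some idx) (some (idx + 5)))]
  rw [List.nil_append]
  rw [PySem.List.len_eq]
  rw [PySem.List.pyRange_of_pos 0 ((xs.length : Int)) (s := 5) (by norm_num)]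
  rw [List.map_map]
  have hM : (if (0 : Int) < ((xs.length : Int))
      then ((((xs.length : Int)) - 0 + 5 - 1) / 5).toNat else 0) = (xs.length + 4) / 5 := by
    split_ifs with hp <;> omega
  rw [hM]
  rw [← rangeMap_eq_chunks ((xs.length + 4) / 5) xs rfl]
  apply List.map_congr_left
  intro k _
  simp only [Function.comp_apply]
  have h0 : (0 : Int) + 5 * (k : Int) = ((5 * k : Nat) : Int) := by push_cast; ring
  rw [h0]
  have h5' : ((5 * k : Nat) : Int) + 5 = ((5 * k : Nat) : Int) + ((5 : Nat) : Int) := by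
    norm_num
  rw [h5', PySem.List.slice_natCast_add]

theorem split_labels_main (l : List String) : split_labels l = split_labels_alt l := by
  unfold split_labels split_labels_alt
  rw [PySem.List.foldl_append_singleton_eq_map, PySem.List.foldl_append_singleton_eq_map,
      List.nil_append, List.nil_append]
  exact List.map_congr_left (fun s _ => line_eq s)

-- ===== VERDICT (by name: the statement is the Claim_ definition above) =====
theorem split_labels_spec : Claim_equal_split_labels := by
  intro l _ _
  unfold Spec_split_labels
  exact split_labels_main l
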